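-- pv_equiv track=rewrite | github.com/CharlesCNorton/AI-Bootstrap | McMullen-problem/tests/test8.py | compute_h_vector
-- ===== SOURCE A (Python) =====
-- from math import comb
--
-- def compute_h_vector(f_vector, d):
--     f = [1] + f_vector
--     h_vector = []
--     for i in range(0, d + 1):
--         h_i = 0
--         for j in range(0, i + 1):
--             sign = (-1) ** (i - j)
--             coeff = comb(d - j, d - i)
--             h_i += sign * coeff * f[j]
--         h_vector.append(h_i)
--     return h_vector
-- ===== SOURCE B (Python) =====
-- from math import comb
--
-- def compute_h_vector(f_vector, d):
--     # Generating-polynomial method: h is read off from sum_j f[j]*(x-1)^(d-j).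
--     f = [1] + f_vector
--     acc = [0] * (d + 1)          # acc[k] = coefficient of x^k
--     for j in range(d + 1):
--         fj = f[j]
--         m = d - j
--         for k in range(m + 1):
--             acc[k] += fj * ((-1) ** (m - k)) * comb(m, k)
--     return acc[::-1]             # h_i = coefficient of x^(d-i)
-- ===== Notes on version B (the rewrite author's own statement) =====
-- stated objective: alternative
-- what changed: Instead of A's per-entry double sum h_i = sum_j (-1)^(i-j) C(d-j,d-i) f[j], B accumulates the coefficient list of the generating polynomial sum_j f[j]*(x-1)^(d-j) (outer loop over j adding a signed binomial row) and reads the h-vector off in reverse degree order.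
import Mathlib
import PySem

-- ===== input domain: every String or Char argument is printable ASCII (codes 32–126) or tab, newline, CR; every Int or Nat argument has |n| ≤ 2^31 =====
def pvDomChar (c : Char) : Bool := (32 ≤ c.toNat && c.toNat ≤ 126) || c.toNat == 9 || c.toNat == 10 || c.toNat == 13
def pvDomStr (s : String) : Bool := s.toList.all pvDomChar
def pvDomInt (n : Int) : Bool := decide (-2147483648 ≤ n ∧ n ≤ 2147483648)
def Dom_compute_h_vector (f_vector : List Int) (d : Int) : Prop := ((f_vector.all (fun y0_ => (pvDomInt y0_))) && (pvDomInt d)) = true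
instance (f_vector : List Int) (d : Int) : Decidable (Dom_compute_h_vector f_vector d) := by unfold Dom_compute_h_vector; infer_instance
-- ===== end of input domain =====

-- B computes the h-vector by accumulating the coefficients of the generating polynomial
-- sum_j f[j]*(x-1)^(d-j) and reading them in reverse degree order, instead of A's
-- per-entry double sum; same O(d^2) cost, different decomposition.

-- ===== PORT A =====
-- math.comb n k; exact for 0 ≤ k ≤ n, the only arguments either program reaches
def pyComb (n k : Int) : Int := (Nat.choose n.toNat k.toNat : Int)

-- f[j] reads are ported with default 0; always in-range when Pre_ holds (d ≤ len f_vector)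
def compute_h_vector (f_vector : List Int) (d : Int) : List Int :=
  let f := (1 : Int) :: f_vector
  (PySem.List.pyRange 0 (d+1) 1).foldl
    (fun h i =>
      h ++ [(PySem.List.pyRange 0 (i+1) 1).foldl
        (fun hi j => hi + (-1 : Int)^(i-j).toNat * pyComb (d-j) (d-i) * PySem.List.pyGetD f j 0) 0])
    []

-- ===== PORT B =====
def compute_h_vector_alt (f_vector : List Int) (d : Int) : List Int :=
  let f := (1 : Int) :: f_vector
  let acc := (PySem.List.pyRange 0 (d+1) 1).foldl
    (fun acc j =>
      let fj := PySem.List.pyGetD f j 0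
      let m := d - j
      (PySem.List.pyRange 0 (m+1) 1).foldl
        (fun a k => a.set k.toNat (PySem.List.pyGetD a k 0 + fj * (-1 : Int)^(m-k).toNat * pyComb m k))
        acc)
    (List.replicate (d+1).toNat (0 : Int))
  acc.reverse

-- ===== PRECONDITION & SPEC =====
-- A (and B) raise IndexError reading f[j] exactly when d > len(f_vector); Pre_ excludes those.
def Pre_compute_h_vector (f_vector : List Int) (d : Int) : Prop := d ≤ (f_vector.length : Int)
instance (f_vector : List Int) (d : Int) : Decidable (Pre_compute_h_vector f_vector d) := by unfold Pre_compute_h_vector; infer_instance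
def pvWitness_compute_h_vector : List Int × Int := ([4, 6, 4], 3)

def Spec_compute_h_vector (f_vector : List Int) (d : Int) (out : List Int) : Prop := out = compute_h_vector_alt f_vector d
instance (f_vector : List Int) (d : Int) (out : List Int) : Decidable (Spec_compute_h_vector f_vector d out) := by unfold Spec_compute_h_vector; infer_instance

-- ===== CLAIM (what is proved, stated in full; the proofs are below) =====
def Claim_equal_compute_h_vector : Prop := ∀ (f_vector : List Int) (d : Int), Dom_compute_h_vector f_vector d → Pre_compute_h_vector f_vector d → Spec_compute_h_vector f_vector d (compute_h_vector f_vector d)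

-- ===== LEMMAS AND PROOFS =====

-- the term both programs sum, as a function of Nat indices j (input position) and t (degree)
def pvBody (f_vector : List Int) (d : Int) (j t : Nat) : Int :=
  PySem.List.pyGetD ((1 : Int) :: f_vector) (↑j) 0 * (-1 : Int)^((d - ↑j) - ↑t).toNat * pyComb (d - ↑j) (↑t)

-- one iteration of B's outer loop, over Nat indices
def pvStep (f_vector : List Int) (d : Int) (a : List Int) (j : Nat) : List Int :=
  (List.range ((d - (j : Int)) + 1).toNat).foldl
    (fun a k => a.set k (a.getD k 0 + pvBody f_vector d j k)) a

-- A as a map of inner sums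
lemma A_eq_map (f_vector : List Int) (d : Int) :
    compute_h_vector f_vector d =
      (List.range (d+1).toNat).map (fun (i : Nat) =>
        ((List.range ((i : Int)+1).toNat).map (fun (j : Nat) =>
          (-1 : Int)^((i : Int) - (j : Int)).toNat * pyComb (d - (j : Int)) (d - (i : Int)) *
            PySem.List.pyGetD ((1 : Int) :: f_vector) (j : Int) 0)).sum) := by
  unfold compute_h_vector
  simp only [PySem.List.foldl_append_singleton_eq_map, List.nil_append,
    PySem.List.foldl_add, PySem.List.pyRange_one, Int.sub_zero, zero_add,
    List.map_map, Function.comp_def]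

lemma setfold_length (g : Nat → Int) (acc : List Int) (N : Nat) :
    ((List.range N).foldl (fun a k => a.set k (a.getD k 0 + g k)) acc).length = acc.length := by
  induction N with
  | zero => simp
  | succ N ih =>
    rw [List.range_succ, List.foldl_append]
    simp only [List.foldl_cons, List.foldl_nil, List.length_set]
    exact ih

lemma setfold_getD (g : Nat → Int) (acc : List Int) (N : Nat) (h : N ≤ acc.length) (t : Nat) :
    ((List.range N).foldl (fun a k => a.set k (a.getD k 0 + g k)) acc).getD t 0 =
      acc.getD t 0 + (if t < N then g t else 0) := by
  induction N with
  | zero => simp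
  | succ N ih =>
    rw [List.range_succ, List.foldl_append]
    simp only [List.foldl_cons, List.foldl_nil]
    have hlen := setfold_length g acc N
    have ihN := ih (by omega)
    by_cases ht : t = N
    · subst ht
      rw [List.getD_eq_getElem?_getD, List.getElem?_set_self (by rw [hlen]; omega)]
      simp only [Option.getD_some]
      rw [ihN]
      simp
    · rw [List.getD_eq_getElem?_getD, List.getElem?_set_ne (by omega),
        ← List.getD_eq_getElem?_getD, ihN]
      congr 1
      have h1 : t < N + 1 ↔ t < N := by omega
      simp [h1]

lemma pvStep_length (f_vector : List Int) (d : Int) (a : List Int) (j : Nat) :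
    (pvStep f_vector d a j).length = a.length := by
  unfold pvStep; rw [setfold_length]

lemma pvStep_getD (f_vector : List Int) (d : Int) (a : List Int) (j : Nat)
    (h : ((d - (j : Int)) + 1).toNat ≤ a.length) (t : Nat) :
    (pvStep f_vector d a j).getD t 0 =
      a.getD t 0 + (if t < ((d - (j : Int)) + 1).toNat then pvBody f_vector d j t else 0) := by
  unfold pvStep; exact setfold_getD _ _ _ h t

-- B's accumulator after the outer loop, elementwise
lemma outer_aux (f_vector : List Int) (d : Int) (hd : 0 ≤ d) (J : Nat) (hJ : J ≤ (d+1).toNat)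
    (acc : List Int) (hlen : acc.length = (d+1).toNat) :
    (((List.range J).foldl (pvStep f_vector d) acc).length = (d+1).toNat) ∧
    (∀ t : Nat,
      ((List.range J).foldl (pvStep f_vector d) acc).getD t 0 =
        acc.getD t 0 + ((List.range J).map (fun j =>
          if t < (d+1).toNat - j then pvBody f_vector d j t else 0)).sum) := by
  induction J with
  | zero => simpa using hlen
  | succ J ih =>
    obtain ⟨ih1, ih2⟩ := ih (by omega)
    have hN : ((d - (J : Int)) + 1).toNat ≤ (d+1).toNat := by omega
    constructor
    · rw [List.range_succ, List.foldl_append]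
      simp only [List.foldl_cons, List.foldl_nil]
      rw [pvStep_length]
      exact ih1
    · intro t
      rw [List.range_succ, List.foldl_append]
      simp only [List.foldl_cons, List.foldl_nil]
      rw [pvStep_getD _ _ _ _ (by rw [ih1]; exact hN), ih2 t]
      rw [List.map_append, List.sum_append]
      have hcond : (t < ((d - (J : Int)) + 1).toNat) ↔ (t < (d+1).toNat - J) := by omega
      simp only [List.map_cons, List.map_nil, List.sum_cons, List.sum_nil, add_zero]
      rw [if_congr hcond rfl rfl]
      ring

-- B rewritten as the Nat-indexed accumulator, reversed
lemma B_eq (f_vector : List Int) (d : Int) :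
    compute_h_vector_alt f_vector d =
      ((List.range (d+1).toNat).foldl (pvStep f_vector d)
        (List.replicate (d+1).toNat (0 : Int))).reverse := by
  unfold compute_h_vector_alt
  simp only [PySem.List.pyRange_one, Int.sub_zero, List.foldl_map, zero_add,
    Int.toNat_natCast, PySem.List.pyGetD_natCast, List.getD_eq_getElem?_getD]
  unfold pvStep
  simp only [pvBody, PySem.List.pyGetD_natCast, List.getD_eq_getElem?_getD]

lemma sum_cut (n i : Nat) (hi : i < n) (Body : Nat → Int) :
    ((List.range n).map (fun j => if n - 1 - i < n - j then Body j else 0)).sum =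
      ((List.range (i+1)).map Body).sum := by
  have hsplit : List.range n = List.range (i+1) ++ (List.range (n-i-1)).map ((i+1) + ·) := by
    rw [← List.range_add]; congr 1; omega
  rw [hsplit, List.map_append, List.sum_append, List.map_map]
  have h2 : (((List.range (n-i-1)).map ((fun j => if n - 1 - i < n - j then Body j else 0) ∘ ((i+1) + ·)))).sum = 0 := by
    apply List.sum_eq_zero
    intro x hx
    obtain ⟨k, hk, rfl⟩ := List.mem_map.mp hx
    simp only [Function.comp_apply]
    rw [if_neg (by omega)]
  rw [h2, add_zero]
  apply congrArg
  apply List.map_congr_left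
  intro j hj
  have := List.mem_range.mp hj
  rw [if_pos (by omega)]

-- ===== VERDICT (by name: the statement is the Claim_ definition above) =====
theorem compute_h_vector_spec : Claim_equal_compute_h_vector := by
  intro f_vector d _ _
  unfold Spec_compute_h_vector
  by_cases hd : 0 ≤ d
  · rw [A_eq_map, B_eq]
    obtain ⟨hlen, hget⟩ := outer_aux f_vector d hd (d+1).toNat le_rfl
      (List.replicate (d+1).toNat 0) (by simp)
    apply List.ext_getElem
    · simp [hlen]
    · intro i h1 h2
      have hi : i < (d+1).toNat := by simpa using h1
      rw [List.getElem_map, List.getElem_range]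
      rw [List.getElem_reverse]
      rw [← List.getD_eq_getElem _ 0]
      rw [hlen, hget]
      have hz : (List.replicate (d+1).toNat (0:Int)).getD ((d+1).toNat - 1 - i) 0 = 0 := by
        rw [List.getD_eq_getElem?_getD, List.getElem?_replicate]
        split <;> rfl
      rw [hz, zero_add]
      rw [sum_cut _ _ hi]
      have hiInt : ((i : Int) + 1).toNat = i + 1 := by omega
      rw [hiInt]
      apply congrArg
      apply List.map_congr_left
      intro j hj
      have hji := List.mem_range.mp hj
      unfold pvBody
      have hc : (((d+1).toNat - 1 - i : Nat) : Int) = d - (i : Int) := by omega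
      rw [hc]
      have he : ((d - (j : Int)) - (d - (i : Int))).toNat = ((i : Int) - (j : Int)).toNat := by omega
      rw [he]
      ring
  · unfold compute_h_vector compute_h_vector_alt
    rw [PySem.List.pyRange_one_eq_nil (by omega)]
    simp [show (d+1).toNat = 0 by omega]
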